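-- pv_equiv track=rewrite | github.com/Deeifi/urokovichok | backend/logic/constraints.py | has_gaps
-- ===== SOURCE A (Python) =====
-- def has_gaps(mask: int, max_period: int) -> int:
--     if mask == 0: return 0
--     first = 0
--     while not (mask & (1 << first)): first += 1
--     last = max_period
--     while last >= first and not (mask & (1 << last)): last -= 1
--     if first >= last: return 0
--     gaps = 0
--     for i in range(first, last + 1):
--         if not (mask & (1 << i)): gaps += 1
--     return gaps
-- ===== SOURCE B (Python) =====
-- def has_gaps(mask: int, max_period: int) -> int:
--     if max_period < 0:
--         return 0
--     m = mask & ((1 << (max_period + 1)) - 1)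
--     if m == 0:
--         return 0
--     low = (m & -m).bit_length() - 1
--     high = m.bit_length() - 1
--     return (high - low + 1) - bin(m).count("1")
-- ===== Notes on version B (the rewrite author's own statement) =====
-- stated objective: faster
-- what changed: replaces A's three bit-scanning loops (find first set bit, walk down from max_period to the last set bit, count unset bits in between) with branch-free bit arithmetic: mask to the range, locate the outermost set bits via bit_length of m and of m & -m, and return span minus popcount
import Mathlib
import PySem

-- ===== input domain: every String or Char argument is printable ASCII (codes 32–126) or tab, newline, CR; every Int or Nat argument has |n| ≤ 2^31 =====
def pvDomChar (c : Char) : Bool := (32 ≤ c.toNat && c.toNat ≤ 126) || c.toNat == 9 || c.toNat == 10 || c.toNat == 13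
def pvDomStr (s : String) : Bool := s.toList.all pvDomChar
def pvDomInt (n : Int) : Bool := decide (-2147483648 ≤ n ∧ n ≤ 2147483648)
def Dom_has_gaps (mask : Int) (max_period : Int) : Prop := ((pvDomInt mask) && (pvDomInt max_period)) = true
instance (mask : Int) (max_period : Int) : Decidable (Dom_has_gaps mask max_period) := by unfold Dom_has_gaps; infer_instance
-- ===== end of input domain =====

-- B replaces A's three bit-scanning loops by branch-free bit arithmetic (mask the range, bit_length of m and of m&-m, popcount); measurably faster since A rebuilds 1<<i on every iteration.

-- ===== PORT A =====
-- `while not (mask & (1 << first)): first += 1` — fuel-bounded search; the least set-bit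
-- index of a nonzero mask is ≤ mask.natAbs (proved below), so the fuel never runs out.
def pvFirstLoop (mask : Int) (first : Nat) : Nat → Nat
  | 0 => first
  | fuel+1 =>
    if PySem.Int.band mask ((1:Int) <<< first) = 0 then pvFirstLoop mask (first+1) fuel
    else first

-- `while last >= first and not (mask & (1 << last)): last -= 1`; the shift `1 << last` is
-- only evaluated when last ≥ first ≥ 0, where `last.toNat` is exact.
def pvLastLoop (mask : Int) (first : Nat) (last : Int) : Int :=
  if h : (first:Int) ≤ last ∧ PySem.Int.band mask ((1:Int) <<< last.toNat) = 0 then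
    pvLastLoop mask first (last - 1)
  else last
termination_by (last + 1 - (first:Int)).toNat
decreasing_by omega

def has_gaps (mask : Int) (max_period : Int) : Int :=
  if mask = 0 then 0
  else
    let first := pvFirstLoop mask 0 (mask.natAbs + 1)
    let last := pvLastLoop mask first max_period
    if (first:Int) ≥ last then 0
    else
      -- for i in range(first, last + 1): i ≥ first ≥ 0, so i.toNat is exact in `1 << i`
      (PySem.List.pyRange (first:Int) (last+1)).foldl
        (fun gaps i => if PySem.Int.band mask ((1:Int) <<< i.toNat) = 0 then gaps + 1 else gaps) 0

-- ===== PORT B =====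
-- transliteration of Source B: mask to the range, then bit_length / popcount arithmetic.
-- `1 << (max_period + 1)`: max_period ≥ 0 in this branch, so (max_period+1).toNat is exact;
-- `bin(m).count("1")` is the popcount of m ≥ 0, i.e. PySem.Int.bitCount m.
def has_gaps_alt (mask : Int) (max_period : Int) : Int :=
  if max_period < 0 then 0
  else
    let m := PySem.Int.band mask (((1:Int) <<< (max_period + 1).toNat) - 1)
    if m = 0 then 0
    else
      let low : Int := (PySem.Int.bitLength (PySem.Int.band m (-m)) : Int) - 1
      let high : Int := (PySem.Int.bitLength m : Int) - 1
      (high - low + 1) - (PySem.Int.bitCount m : Int)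

-- ===== PRECONDITION & SPEC =====
def Spec_has_gaps (mask : Int) (max_period : Int) (out : Int) : Prop := out = has_gaps_alt mask max_period
instance (mask : Int) (max_period : Int) (out : Int) : Decidable (Spec_has_gaps mask max_period out) := by unfold Spec_has_gaps; infer_instance

-- ===== CLAIM (what is proved, stated in full; the proofs are below) =====
def Claim_equal_has_gaps : Prop := ∀ (mask : Int) (max_period : Int), Dom_has_gaps mask max_period → Spec_has_gaps mask max_period (has_gaps mask max_period)

-- ===== LEMMAS AND PROOFS =====

-- Python's bit i of an arbitrary integer a (two's complement): (a >> i) & 1 == 1.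
def pvBit (a : Int) (i : Nat) : Bool := decide (a / 2^i % 2 = 1)

theorem pv_shl_one (n : Nat) : (1:Int) <<< n = 2^n := by
  simp [Int.shiftLeft_eq]

theorem pv_shl_one_int (n : Nat) : (1:Int) <<< ((n:Nat):Int) = 2^n := by
  rw [Int.one_shiftLeft]
  push_cast
  ring

theorem pv_two_pow_cast (i : Nat) : ((2^i : Nat) : Int) = 2^i := by push_cast; ring

theorem pvBit_natCast (x i : Nat) : pvBit (x:Int) i = x.testBit i := by
  rw [Nat.testBit_eq_decide_div_mod_eq]
  unfold pvBit
  rw [← pv_two_pow_cast, ← Int.natCast_ediv]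
  generalize x / 2^i = y
  by_cases h : y % 2 = 1 <;> simp [h] <;> omega

theorem pvBit_succ (a : Int) (i : Nat) : pvBit a (i+1) = pvBit (a/2) i := by
  unfold pvBit
  rw [Int.ediv_ediv_of_nonneg (by norm_num)]
  norm_num [pow_succ, mul_comm]

theorem pvBit_zero (a : Int) : pvBit a 0 = decide (a % 2 = 1) := by
  unfold pvBit; norm_num

theorem exists_pvBit : ∀ (n : Nat) (a : Int), a.natAbs ≤ n → a ≠ 0 →
    ∃ f, f ≤ a.natAbs ∧ pvBit a f = true := by
  intro n
  induction n with
  | zero => intro a ha h0; omega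
  | succ n ih =>
    intro a ha h0
    have h2 : a % 2 = 0 ∨ a % 2 = 1 := by omega
    rcases h2 with h2 | h2
    · have hne : a / 2 ≠ 0 := by omega
      have hle : (a/2).natAbs ≤ n := by omega
      obtain ⟨f, hf, hb⟩ := ih (a/2) hle hne
      refine ⟨f+1, by omega, ?_⟩
      rw [pvBit_succ]; exact hb
    · exact ⟨0, Nat.zero_le _, by rw [pvBit_zero]; simp [h2]⟩

theorem pvBit_neg (n i : Nat) : pvBit (-(n:Int) - 1) i = !(n.testBit i) := by
  rw [Nat.testBit_eq_decide_div_mod_eq]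
  unfold pvBit
  have hq := Nat.div_add_mod n (2^i)
  set q := n / 2^i with hqdef
  set r := n % 2^i with hrdef
  have hr : r < 2^i := Nat.mod_lt _ (by positivity)
  have hr' : (r:Int) < 2^i := by exact_mod_cast hr
  have hr0 : (0:Int) ≤ r := by positivity
  have hd : (-(n:Int) - 1) / 2^i = -(q:Int) - 1 := by
    have hn : ((2^i * q + r : Nat) : Int) = (n:Int) := by exact_mod_cast congrArg (Nat.cast : Nat → Int) hq
    push_cast at hn
    have hrw : (-(n:Int) - 1) = ((2:Int)^i - 1 - r) + (-(q:Int) - 1) * 2^i := by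
      rw [← hn]; ring
    rw [hrw, Int.add_mul_ediv_right _ _ (by positivity : (2:Int)^i ≠ 0)]
    rw [Int.ediv_eq_zero_of_lt (by omega) (by omega)]
    ring
  rw [hd]
  by_cases hp : q % 2 = 1 <;> simp [hp] <;> omega

theorem band_two_pow (a : Int) (i : Nat) :
    PySem.Int.band a (2^i) = if pvBit a i then 2^i else 0 := by
  by_cases ha : 0 ≤ a
  · obtain ⟨x, rfl⟩ : ∃ x : Nat, a = (x:Int) := ⟨a.toNat, (Int.toNat_of_nonneg ha).symm⟩
    rw [← pv_two_pow_cast, PySem.Int.band_natCast, Nat.and_two_pow, pvBit_natCast]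
    cases x.testBit i <;> simp
  · obtain ⟨n, rfl⟩ : ∃ n : Nat, a = -(n:Int) - 1 := ⟨(-a-1).toNat, by omega⟩
    simp only [PySem.Int.band]
    rw [if_neg (by omega), if_pos (by positivity)]
    have h2 : ((2:Int)^i).toNat = 2^i := by
      rw [← pv_two_pow_cast]; exact Int.toNat_natCast _
    have h3 : (-(-(n:Int)-1) - 1).toNat = n := by omega
    rw [h2, h3, Nat.land_comm, Nat.and_two_pow, pvBit_neg]
    cases n.testBit i <;> simp

theorem band_mask (a : Int) (s : Nat) : PySem.Int.band a (2^s - 1) = a % 2^s := by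
  have h1 : (1:Nat) ≤ 2^s := Nat.one_le_two_pow
  have h1' : (1:Int) ≤ 2^s := by exact_mod_cast (by exact_mod_cast h1 : ((1:Nat):Int) ≤ ((2^s : Nat) : Int))
  by_cases ha : 0 ≤ a
  · obtain ⟨x, rfl⟩ : ∃ x : Nat, a = (x:Int) := ⟨a.toNat, (Int.toNat_of_nonneg ha).symm⟩
    have hc : ((2:Int)^s - 1) = ((2^s - 1 : Nat) : Int) := by
      rw [Nat.cast_sub h1, pv_two_pow_cast]; norm_num
    rw [hc, PySem.Int.band_natCast, Nat.and_two_pow_sub_one_eq_mod]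
    push_cast
    rfl
  · obtain ⟨n, rfl⟩ : ∃ n : Nat, a = -(n:Int) - 1 := ⟨(-a-1).toNat, by omega⟩
    simp only [PySem.Int.band]
    rw [if_neg (by omega), if_pos (by omega)]
    have h2 : ((2:Int)^s - 1).toNat = 2^s - 1 := by
      rw [← pv_two_pow_cast]; omega
    have h3 : (-(-(n:Int)-1) - 1).toNat = n := by omega
    rw [h2, h3, Nat.land_comm, Nat.and_two_pow_sub_one_eq_mod]
    have hq := Nat.div_add_mod n (2^s)
    set q := n / 2^s with hqd
    set r := n % 2^s with hrd
    have hrlt : r < 2^s := Nat.mod_lt _ (by positivity)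
    have hrlt' : (r:Int) < 2^s := by exact_mod_cast hrlt
    have hr0 : (0:Int) ≤ r := by positivity
    have hn : ((2^s * q + r : Nat) : Int) = (n:Int) := by exact_mod_cast congrArg (Nat.cast : Nat → Int) hq
    push_cast at hn
    have hrw : (-(n:Int) - 1) = ((2:Int)^s - 1 - r) + (-(q:Int) - 1) * 2^s := by
      rw [← hn]; ring
    rw [hrw, Int.add_mul_emod_self_right, Int.emod_eq_of_lt (by omega) (by omega)]
    rw [← pv_two_pow_cast]
    omega

theorem pvBit_emod (a : Int) (s j : Nat) :
    pvBit (a % 2^s) j = (decide (j < s) && pvBit a j) := by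
  by_cases hj : j < s
  · simp only [hj, decide_true, Bool.true_and]
    unfold pvBit
    have hd : (a % 2^s) / 2^j = a / 2^j + (-(2^(s-j) * (a / 2^s))) := by
      have hpow : (2:Int)^s = 2^(s-j) * 2^j := by
        rw [← pow_add]; congr 1; omega
      rw [Int.emod_def, hpow]
      have hrw : a - 2^(s-j) * 2^j * (a / (2^(s-j) * 2^j)) =
          a + (-(2^(s-j) * (a / (2^(s-j) * 2^j)))) * 2^j := by ring
      rw [hrw, Int.add_mul_ediv_right _ _ (by positivity : (2:Int)^j ≠ 0)]
    rw [hd]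
    obtain ⟨e, he⟩ : (2:Int) ∣ 2^(s-j) :=
      dvd_pow_self 2 (by omega : s - j ≠ 0)
    rw [he, mul_assoc]
    generalize a / 2^j = y
    generalize e * (a / 2^s) = w
    by_cases hp : y % 2 = 1 <;> simp [hp]
  · simp only [hj, decide_false, Bool.false_and]
    have h0 : 0 ≤ a % 2^s := Int.emod_nonneg a (by positivity)
    have h1 : a % 2^s < 2^s := Int.emod_lt_of_pos a (by positivity)
    have hle : (2:Int)^s ≤ 2^j := pow_le_pow_right₀ (by norm_num) (by omega)
    have hz : (a % 2^s) / 2^j = 0 := Int.ediv_eq_zero_of_lt h0 (lt_of_lt_of_le h1 hle)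
    simp [pvBit, hz]

theorem firstLoop_eq (mask : Int) : ∀ (fuel k f : Nat), k ≤ f → f < k + fuel →
    pvBit mask f = true → (∀ j, k ≤ j → j < f → pvBit mask j = false) →
    pvFirstLoop mask k fuel = f := by
  intro fuel
  induction fuel with
  | zero => intro k f h1 h2 _ _; omega
  | succ fuel ih =>
    intro k f hkf hlt hf hmin
    simp only [pvFirstLoop]
    rw [pv_shl_one, band_two_pow]
    by_cases hk : k = f
    · subst hk
      rw [hf]
      simp
    · have hfalse : pvBit mask k = false := hmin k le_rfl (by omega)
      rw [hfalse]
      simp only [Bool.false_eq_true, if_false]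
      exact ih (k+1) f (by omega) (by omega) hf (fun j hj1 hj2 => hmin j (by omega) hj2)

theorem lastLoop_base (mask : Int) (first h' : Nat) (hbit : pvBit mask h' = true) :
    pvLastLoop mask first (h':Int) = (h':Int) := by
  rw [pvLastLoop]
  have hb : PySem.Int.band mask ((1:Int) <<< ((h':Int)).toNat) ≠ 0 := by
    rw [Int.toNat_natCast, pv_shl_one, band_two_pow, hbit]
    simp
  rw [dif_neg (fun hcon => hb hcon.2)]

theorem lastLoop_stop (mask : Int) (first : Nat) (last : Int) (h : ¬ ((first:Int) ≤ last)) :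
    pvLastLoop mask first last = last := by
  rw [pvLastLoop]
  simp [h]

theorem lastLoop_eq (mask : Int) (first h : Nat) (hfh : first ≤ h) (hbit : pvBit mask h = true) :
    ∀ (n : Nat) (last : Int), (h:Int) ≤ last → (last - h).toNat ≤ n →
    (∀ j : Nat, h < j → (j:Int) ≤ last → pvBit mask j = false) →
    pvLastLoop mask first last = (h:Int) := by
  intro n
  induction n with
  | zero =>
    intro last hle htn _
    have heq : last = (h:Int) := by omega
    subst heq
    exact lastLoop_base mask first h hbit
  | succ n ih =>
    intro last hle htn hz
    by_cases heq : last = (h:Int)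
    · subst heq
      exact lastLoop_base mask first h hbit
    · have hlt : (h:Int) < last := lt_of_le_of_ne hle (Ne.symm heq)
      rw [pvLastLoop]
      have h0l : (0:Int) ≤ last := by omega
      have hbz : PySem.Int.band mask ((1:Int) <<< last.toNat) = 0 := by
        rw [pv_shl_one, band_two_pow]
        have hfalse : pvBit mask last.toNat = false := hz last.toNat (by omega) (by omega)
        rw [hfalse]
        simp
      rw [dif_pos ⟨by omega, hbz⟩]
      exact ih (last - 1) (by omega) (by omega) (fun j hj hjle => hz j hj (by omega))

theorem low_decomp (x F : Nat) (hF : x.testBit F = true) (hmin : ∀ j, j < F → x.testBit j = false) :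
    x = 2^(F+1) * (x / 2^(F+1)) + 2^F := by
  have hr : x % 2^(F+1) = 2^F := by
    apply Nat.eq_of_testBit_eq
    intro j
    rw [Nat.testBit_mod_two_pow, Nat.testBit_two_pow]
    by_cases h1 : j < F
    · rw [hmin j h1]
      simp
      omega
    · by_cases h2 : j = F
      · subst h2
        simp [hF]
      · have h3 : ¬ (j ≤ F) := by omega
        simp [h3]
        omega
  conv_lhs => rw [← Nat.div_add_mod x (2^(F+1))]
  rw [hr]

theorem band_lsb (m : Int) (F : Nat) (hm : 0 < m) (hF : m.toNat.testBit F = true)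
    (hmin : ∀ j, j < F → m.toNat.testBit j = false) :
    PySem.Int.band m (-m) = 2^F := by
  have hxm : ((m.toNat : Nat) : Int) = m := Int.toNat_of_nonneg (by omega)
  simp only [PySem.Int.band]
  rw [if_pos (by omega), if_neg (by omega)]
  have h3 : (-(-m) - 1).toNat = m.toNat - 1 := by omega
  rw [h3]
  set x := m.toNat with hxd
  have hx1 : 1 ≤ x := by omega
  have hdec := low_decomp x F hF hmin
  set q := x / 2^(F+1) with hqd
  have h2F : (1:Nat) ≤ 2^F := Nat.one_le_two_pow
  have hsub : x - 1 = 2^(F+1) * q + (2^F - 1) := by omega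
  have hFlt : (2:Nat)^F < 2^(F+1) := by
    have : (2:Nat)^(F+1) = 2 * 2^F := by ring
    omega
  have hand : x &&& (x - 1) = 2^(F+1) * q := by
    apply Nat.eq_of_testBit_eq
    intro j
    rw [Nat.testBit_and]
    have e1 : x.testBit j = if j < F+1 then (2^F).testBit j else q.testBit (j - (F+1)) := by
      conv_lhs => rw [hdec]
      rw [Nat.testBit_two_pow_mul_add _ hFlt j]
    have e2 : (x-1).testBit j = if j < F+1 then (2^F - 1).testBit j else q.testBit (j - (F+1)) := by
      rw [hsub, Nat.testBit_two_pow_mul_add _ (by omega) j]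
    have e3 : (2^(F+1) * q).testBit j = if j < F+1 then false else q.testBit (j - (F+1)) := by
      have hq0 : 2^(F+1) * q = 2^(F+1) * q + 0 := by omega
      rw [hq0, Nat.testBit_two_pow_mul_add _ (by positivity) j]
      simp [Nat.zero_testBit]
    rw [e1, e2, e3]
    by_cases hj : j < F + 1
    · simp only [if_pos hj]
      rw [Nat.testBit_two_pow, Nat.testBit_two_pow_sub_one]
      by_cases hjF : j = F
      · subst hjF
        simp
      · simp
        omega
    · simp [hj]
  rw [hand]
  have hfin : x - 2^(F+1) * q = 2^F := by omega
  rw [hfin, pv_two_pow_cast]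

theorem bitLength_two_pow (F : Nat) : PySem.Int.bitLength ((2:Int)^F) = F + 1 := by
  have ha := PySem.Int.lt_two_pow_bitLength ((2:Int)^F)
  have hb := PySem.Int.two_pow_bitLength_le ((2:Int)^F) (by positivity)
  have hnat : ((2:Int)^F).natAbs = 2^F := by
    rw [← pv_two_pow_cast]
    exact Int.natAbs_natCast _
  rw [hnat] at ha hb
  have h3 : F < PySem.Int.bitLength ((2:Int)^F) :=
    (Nat.pow_lt_pow_iff_right (by norm_num)).1 ha
  have h4 : PySem.Int.bitLength ((2:Int)^F) - 1 ≤ F :=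
    (Nat.pow_le_pow_iff_right (by norm_num)).1 hb
  omega

theorem bitCount_countP : ∀ (s x : Nat), x < 2^s →
    PySem.Int.bitCount (x : Int) = (List.range s).countP (fun j => x.testBit j) := by
  intro s
  induction s with
  | zero =>
    intro x hx
    have hx0 : x = 0 := by
      have : x < 1 := by simpa using hx
      omega
    subst hx0
    simp [PySem.Int.bitCount_zero]
  | succ s ih =>
    intro x hx
    by_cases h0 : x = 0
    · subst h0
      simp [PySem.Int.bitCount_zero, Nat.zero_testBit]
    · rw [PySem.Int.bitCount_natCast (Nat.pos_of_ne_zero h0)]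
      have h2 : (2:Nat)^(s+1) = 2 * 2^s := by ring
      rw [ih (x/2) (by omega)]
      rw [List.range_succ_eq_map, List.countP_cons, List.countP_map]
      have hcomp : ((fun j => x.testBit j) ∘ Nat.succ) = (fun j => (x/2).testBit j) := by
        funext j
        simp [Function.comp, Nat.testBit_succ]
      rw [hcomp, Nat.testBit_zero]
      by_cases hp : x % 2 = 1 <;> simp [hp] <;> omega

theorem pyRange_natCast : ∀ (n a : Nat),
    PySem.List.pyRange (a:Int) ((a+n : Nat):Int) = (List.range' a n).map (fun k : Nat => (k:Int)) := by
  intro n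
  induction n with
  | zero =>
    intro a
    rw [PySem.List.pyRange_one_eq_nil (by omega)]
    simp [List.range'_zero]
  | succ n ih =>
    intro a
    have hc : ((a + (n+1) : Nat):Int) = ((a + n : Nat):Int) + 1 := by push_cast; ring
    rw [hc, PySem.List.pyRange_one_succ_right (by omega)]
    rw [ih a, List.range'_concat]
    simp

theorem pv_main (mask max_period : Int) : has_gaps mask max_period = has_gaps_alt mask max_period := by
  simp only [has_gaps, has_gaps_alt]
  by_cases h0 : mask = 0
  · subst h0
    by_cases hmp : max_period < 0
    · simp [hmp]
    · rw [if_neg hmp, pv_shl_one ((max_period+1).toNat), band_mask]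
      simp
  · rw [if_neg h0]
    obtain ⟨fw, hfw, hfwb⟩ := exists_pvBit mask.natAbs mask le_rfl h0
    have hex : ∃ f, pvBit mask f = true := ⟨fw, hfwb⟩
    have hFb : pvBit mask (Nat.find hex) = true := Nat.find_spec hex
    set F := Nat.find hex with hFdef
    have hFmin : ∀ j, j < F → pvBit mask j = false := by
      intro j hj
      have := Nat.find_min hex hj
      simpa using this
    have hFle : F ≤ mask.natAbs := le_trans (Nat.find_min' hex hfwb) hfw
    have hfirst : pvFirstLoop mask 0 (mask.natAbs + 1) = F :=
      firstLoop_eq mask (mask.natAbs+1) 0 F (Nat.zero_le _) (by omega) hFb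
        (fun j _ hj => hFmin j hj)
    rw [hfirst]
    by_cases hmp : max_period < 0
    · rw [lastLoop_stop mask F max_period (by omega), if_pos (by omega), if_pos hmp]
    · rw [if_neg hmp]
      set s := (max_period + 1).toNat with hsdef
      have hsInt : ((s:Nat):Int) = max_period + 1 := by omega
      rw [pv_shl_one, band_mask]
      set m := mask % 2^s with hmdef
      have hm0 : 0 ≤ m := Int.emod_nonneg mask (by positivity)
      have hmlt : m < 2^s := Int.emod_lt_of_pos mask (by positivity)
      have hbits : ∀ j, pvBit m j = (decide (j < s) && pvBit mask j) := fun j => pvBit_emod mask s j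
      by_cases hmz : m = 0
      · rw [if_pos hmz]
        have hFs : s ≤ F := by
          by_contra hcon
          push Not at hcon
          have hb := hbits F
          rw [hmz, hFb] at hb
          simp [pvBit, hcon] at hb
        rw [lastLoop_stop mask F max_period (by omega), if_pos (by omega)]
      · rw [if_neg hmz]
        have hxm : ((m.toNat : Nat) : Int) = m := Int.toNat_of_nonneg hm0
        set x := m.toNat with hxdef
        have hx0 : x ≠ 0 := by omega
        have h2s : ((2^s : Nat) : Int) = (2:Int)^s := pv_two_pow_cast s
        have hxlt : x < 2^s := by omega
        have hbx : ∀ j, x.testBit j = (decide (j < s) && pvBit mask j) := by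
          intro j
          rw [← pvBit_natCast x j, hxm]
          exact hbits j
        obtain ⟨i, hi⟩ := Nat.exists_testBit_of_ne_zero hx0
        have his : i < s := by
          by_contra hcon
          push Not at hcon
          rw [Nat.testBit_lt_two_pow
            (lt_of_lt_of_le hxlt (Nat.pow_le_pow_right (by norm_num) hcon))] at hi
          simp at hi
        have hiM : pvBit mask i = true := by
          have hb := hbx i
          rw [hi] at hb
          simpa [his] using hb.symm
        have hFi : F ≤ i := Nat.find_min' hex hiM
        have hFs : F < s := lt_of_le_of_lt hFi his
        have hxF : x.testBit F = true := by
          rw [hbx F]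
          simp [hFs, hFb]
        have hxFmin : ∀ j, j < F → x.testBit j = false := by
          intro j hj
          rw [hbx j]
          simp [hFmin j hj]
        have hla := PySem.Int.lt_two_pow_bitLength m
        have hlb := PySem.Int.two_pow_bitLength_le m hmz
        have hnx : m.natAbs = x := by omega
        rw [hnx] at hla hlb
        set L := PySem.Int.bitLength m with hLdef
        have hL1 : 1 ≤ L := by
          rcases Nat.eq_zero_or_pos L with hL0 | h
          · rw [hL0] at hla
            simp at hla
            omega
          · exact h
        set H := L - 1 with hHdef
        have hH1 : 2^H ≤ x := hlb
        have hH2 : x < 2^(H+1) := by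
          have hsucc : H + 1 = L := by omega
          rw [hsucc]
          exact hla
        have hbitH : x.testBit H = true := by
          rw [Nat.testBit_eq_decide_div_mod_eq]
          have hdiv : x / 2^H = 1 := by
            have ha1 : 1 ≤ x / 2^H := (Nat.le_div_iff_mul_le (by positivity)).2 (by omega)
            have ha2 : x / 2^H < 2 := by
              rw [Nat.div_lt_iff_lt_mul (by positivity)]
              have : (2:Nat)^(H+1) = 2^H * 2 := by ring
              omega
            omega
          rw [hdiv]
          norm_num
        have hhigh : ∀ j, H < j → x.testBit j = false := by
          intro j hj
          exact Nat.testBit_lt_two_pow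
            (lt_of_lt_of_le hH2 (Nat.pow_le_pow_right (by norm_num) (by omega)))
        have hFH : F ≤ H := by
          by_contra hcon
          push Not at hcon
          rw [hxFmin H hcon] at hbitH
          simp at hbitH
        have hHs : H < s := (Nat.pow_lt_pow_iff_right (by norm_num)).1 (lt_of_le_of_lt hH1 hxlt)
        have hmb : ∀ j, j < s → pvBit mask j = x.testBit j := by
          intro j hj
          rw [hbx j]
          simp [hj]
        have hlast : pvLastLoop mask F max_period = (H:Int) := by
          apply lastLoop_eq mask F H hFH (by rw [hmb H hHs]; exact hbitH)
            (max_period - H).toNat max_period (by omega) (by omega)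
          intro j hj hjle
          have hjs : j < s := by omega
          rw [hmb j hjs]
          exact hhigh j hj
        rw [hlast]
        have hlsb : PySem.Int.band m (-m) = 2^F := band_lsb m F (by omega) hxF hxFmin
        rw [hlsb, bitLength_two_pow]
        have hpcN : PySem.Int.bitCount m = (List.range' F (H + 1 - F)).countP (fun j => x.testBit j) := by
          rw [← hxm, bitCount_countP s x hxlt, List.range_eq_range']
          have e1 : F + (H + 1 - F) = H + 1 := by omega
          have e2 : (H+1) + (s - H - 1) = s := by omega
          have a1 : List.range' 0 F ++ List.range' F (H+1-F) = List.range' 0 (H+1) := by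
            have ha := @List.range'_append 0 F (H+1-F) 1
            simpa [e1] using ha
          have a2 : List.range' 0 (H+1) ++ List.range' (H+1) (s - H - 1) = List.range' 0 s := by
            have ha := @List.range'_append 0 (H+1) (s-H-1) 1
            simpa [e2] using ha
          rw [← a2, ← a1, List.countP_append, List.countP_append]
          have c1 : (List.range' 0 F).countP (fun j => x.testBit j) = 0 := by
            apply List.countP_eq_zero.2
            intro j hj
            rw [List.mem_range'_1] at hj
            simp [hxFmin j (by omega)]
          have c3 : (List.range' (H+1) (s-H-1)).countP (fun j => x.testBit j) = 0 := by
            apply List.countP_eq_zero.2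
            intro j hj
            rw [List.mem_range'_1] at hj
            simp [hhigh j (by omega)]
          omega
        by_cases hguard : (F:Int) ≥ (H:Int)
        · rw [if_pos hguard]
          have hFH' : F = H := by omega
          rw [hpcN]
          have hone : H + 1 - F = 1 := by omega
          rw [hone, List.range'_one]
          simp only [List.countP_cons, List.countP_nil, hxF]
          push_cast
          omega
        · rw [if_neg hguard]
          have hFHlt : F < H := by omega
          have hre : ((H:Int) + 1) = ((F + (H + 1 - F) : Nat) : Int) := by omega
          rw [hre, pyRange_natCast]
          have hfc := PySem.List.foldl_count_if
            (fun i : Int => decide (PySem.Int.band mask ((1:Int) <<< (i.toNat : Int)) = 0))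
            ((List.range' F (H+1-F)).map (fun k : Nat => (k:Int))) 0
          simp only [decide_eq_true_eq] at hfc
          rw [hfc, List.countP_map]
          have hcp : List.countP
                ((fun i : Int => decide (PySem.Int.band mask ((1:Int) <<< (i.toNat : Int)) = 0)) ∘
                  (fun k : Nat => (k:Int))) (List.range' F (H+1-F))
              = List.countP (fun j => !x.testBit j) (List.range' F (H+1-F)) := by
            apply List.countP_congr
            intro j hj
            rw [List.mem_range'_1] at hj
            have hjs : j < s := by omega
            simp only [Function.comp]
            rw [Int.toNat_natCast, pv_shl_one_int, band_two_pow, hmb j hjs]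
            cases x.testBit j <;> simp
          rw [hcp]
          have hcount := List.length_eq_countP_add_countP (fun j => x.testBit j)
            (l := List.range' F (H+1-F))
          rw [List.length_range'] at hcount
          have hnot : (fun a => decide ¬((fun j => x.testBit j) a = true))
              = (fun j => !x.testBit j) := by
            funext j
            simp
          rw [hnot] at hcount
          rw [hpcN]
          push_cast
          omega

-- ===== VERDICT (by name: the statement is the Claim_ definition above) =====
theorem has_gaps_spec : Claim_equal_has_gaps := by
  intro mask max_period _
  unfold Spec_has_gaps
  exact pv_main mask max_period
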